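-- pv_equiv track=rewrite | github.com/VicWang233/-_for_ups | func_def.py | data_reverse
-- ===== SOURCE A (Python) =====
-- def data_reverse(data,bit):                                     #
--         clear_bin_list = list(bin(data).split('0b')[1])      #10进制转2进制字符串,把字符串转换成数组
--
--         if len(clear_bin_list)<bit:                #如果位数小于指定位数，前面补0
--             for i in range(bit-len(clear_bin_list)):
--                 clear_bin_list.insert(i,'0')
--
--         clear_bin_str = ''                          #定义取反后的二进制字符串
--         for i in range(len(clear_bin_list)):         #取反
--             if clear_bin_list[i] == '0':
--                 clear_bin_list[i] = '1'
--             else: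
--                 clear_bin_list[i] = '0'
--             clear_bin_str+=clear_bin_list[i]
--         return clear_bin_str
-- ===== SOURCE B (Python) =====
-- def data_reverse(data, bit):
--     s = bin(data).split('0b')[1]
--     width = max(bit, len(s))
--     value = int(s, 2)
--     inverted = (1 << width) - 1 - value
--     return format(inverted, '0{}b'.format(width))
-- ===== Notes on version B (the rewrite author's own statement) =====
-- stated objective: faster
-- what changed: Replaces the pad-and-flip character loops by one arithmetic step: parse the stripped binary string, compute the bitwise complement as (1<<width)-1-value, and format it zero-padded to width.
import Mathlib
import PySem

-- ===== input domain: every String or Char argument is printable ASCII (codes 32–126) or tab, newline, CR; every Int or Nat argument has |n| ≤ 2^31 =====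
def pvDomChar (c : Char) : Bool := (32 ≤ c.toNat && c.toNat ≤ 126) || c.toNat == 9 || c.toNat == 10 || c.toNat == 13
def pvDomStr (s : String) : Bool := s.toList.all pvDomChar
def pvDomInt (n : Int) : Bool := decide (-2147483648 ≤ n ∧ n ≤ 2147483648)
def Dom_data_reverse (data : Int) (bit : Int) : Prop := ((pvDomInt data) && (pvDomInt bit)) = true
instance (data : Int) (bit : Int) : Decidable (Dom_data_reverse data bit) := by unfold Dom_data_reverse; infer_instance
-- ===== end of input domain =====

-- B replaces A's pad-and-flip character loops by the arithmetic complement (1<<width)-1-value plus one zero-padded formatting step (objective: simpler).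


-- bin(n).split('0b')[1] for n = |data| : binary digits, MSB first ('0' for 0).
-- Shared helper: both Pythons call the builtin bin(data) and strip '0b' (and the sign).
def pvBinCore (n : Nat) : List Char :=
  if _h : n < 2 then [if n % 2 = 1 then '1' else '0']
  else pvBinCore (n / 2) ++ [if n % 2 = 1 then '1' else '0']
decreasing_by exact Nat.div_lt_self (by omega) (by omega)

-- ===== PORT A =====
def data_reverse (data : Int) (bit : Int) : String :=
  let cs0 := pvBinCore data.natAbs
  -- if len < bit: for i in range(bit-len): insert(i, '0')
  let cs1 := if ((cs0.length : Int)) < bit then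
      (PySem.List.pyRange 0 (bit - (cs0.length : Int)) 1).foldl
        (fun l i => PySem.List.insert l i '0') cs0
    else cs0
  -- flip loop, carrying the (mutated list, accumulated string) state
  let st := (PySem.List.pyRange 0 ((cs1.length : Int)) 1).foldl
      (fun (st : List Char × List Char) i =>
        if PySem.List.pyGetD st.1 i ' ' = '0' then (st.1.set i.toNat '1', st.2 ++ ['1'])
        else (st.1.set i.toNat '0', st.2 ++ ['0']))
      (cs1, [])
  String.mk st.2

-- ===== PORT B =====
def data_reverse_alt (data : Int) (bit : Int) : String :=
  let s := pvBinCore data.natAbs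
  let width := max bit ((s.length : Int))
  let value := s.foldl (fun acc c => 2 * acc + (if c = '1' then 1 else 0)) (0 : Nat)  -- int(s, 2)
  let w := width.toNat
  let inverted := 2 ^ w - 1 - value                         -- (1 << width) - 1 - value
  let t := pvBinCore inverted
  String.mk (List.replicate (w - t.length) '0' ++ t)        -- format(inverted, '0{w}b')

-- ===== PRECONDITION & SPEC =====
def Spec_data_reverse (data : Int) (bit : Int) (out : String) : Prop := out = data_reverse_alt data bit
instance (data : Int) (bit : Int) (out : String) : Decidable (Spec_data_reverse data bit out) := by unfold Spec_data_reverse; infer_instance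

-- ===== CLAIM (what is proved, stated in full; the proofs are below) =====
def Claim_equal_data_reverse : Prop := ∀ (data : Int) (bit : Int), Dom_data_reverse data bit → Spec_data_reverse data bit (data_reverse data bit)

-- ===== LEMMAS AND PROOFS =====

def pvFlip (c : Char) : Char := if c = '0' then '1' else '0'
def pvParse (l : List Char) : Nat := l.foldl (fun acc c => 2 * acc + (if c = '1' then 1 else 0)) 0
def pvIsBin (l : List Char) : Prop := ∀ c ∈ l, c = '0' ∨ c = '1'
-- the w-digit binary rendering, LSB appended last
def pvBits : Nat → Nat → List Char
  | 0, _ => []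
  | w + 1, v => pvBits w (v / 2) ++ [if v % 2 = 1 then '1' else '0']

theorem pvBinCore_len_pos (n : Nat) : 1 ≤ (pvBinCore n).length := by
  rw [pvBinCore]; split <;> simp

theorem pvBinCore_isBin (n : Nat) : pvIsBin (pvBinCore n) := by
  induction n using Nat.strong_induction_on with
  | _ n ih =>
    rw [pvBinCore]
    split
    · intro c hc; simp at hc; subst hc; split <;> simp
    · intro c hc
      rcases List.mem_append.1 hc with h | h
      · exact ih (n / 2) (Nat.div_lt_self (by omega) (by omega)) c h
      · simp at h; subst h; split <;> simp

theorem pvBinCore_len_le (w v : Nat) (hv : v < 2 ^ (w + 1)) :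
    (pvBinCore v).length ≤ w + 1 := by
  induction w generalizing v with
  | zero =>
    rw [pvBinCore]; split
    · simp
    · omega
  | succ w ih =>
    rw [pvBinCore]; split
    · simp
    · have h2 : v / 2 < 2 ^ (w + 1) := by
        have h := hv; rw [pow_succ] at h; omega
      have := ih (v / 2) h2
      simp only [List.length_append, List.length_singleton]
      omega

theorem pvBits_zero (w : Nat) : pvBits w 0 = List.replicate w '0' := by
  induction w with
  | zero => rfl
  | succ w ih => simp [pvBits, ih, List.replicate_succ']

theorem pvPadBin (w v : Nat) (hv : v < 2 ^ (w + 1)) :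
    List.replicate (w + 1 - (pvBinCore v).length) '0' ++ pvBinCore v = pvBits (w + 1) v := by
  induction w generalizing v with
  | zero =>
    have hv2 : v < 2 := by simpa using hv
    rw [pvBinCore]
    simp only [hv2, dif_pos, List.length_singleton, Nat.sub_self, List.replicate_zero,
      List.nil_append]
    rw [show pvBits 1 v = pvBits 0 (v / 2) ++ [if v % 2 = 1 then '1' else '0'] from rfl]
    simp [pvBits]
  | succ w ih =>
    rw [pvBinCore]
    rw [show pvBits (w + 1 + 1) v = pvBits (w + 1) (v / 2) ++ [if v % 2 = 1 then '1' else '0']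
      from rfl]
    split
    · rename_i hlt
      have h0 : v / 2 = 0 := by omega
      rw [h0, pvBits_zero]
      simp [List.replicate_succ']
    · rename_i hge
      have h2 : v / 2 < 2 ^ (w + 1) := by
        have h := hv; rw [pow_succ] at h; omega
      have hL : (pvBinCore (v / 2)).length ≤ w + 1 := pvBinCore_len_le w (v / 2) h2
      rw [← ih (v / 2) h2]
      simp only [List.length_append, List.length_singleton]
      rw [show w + 1 + 1 - ((pvBinCore (v / 2)).length + 1) = w + 1 - (pvBinCore (v / 2)).length
        by omega, List.append_assoc]

theorem pvParse_append_bit (l : List Char) (c : Char) :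
    pvParse (l ++ [c]) = 2 * pvParse l + (if c = '1' then 1 else 0) := by
  simp [pvParse, List.foldl_append]

theorem pvParse_lt (l : List Char) : pvParse l < 2 ^ l.length := by
  induction l using List.reverseRecOn with
  | nil => simp [pvParse]
  | append_singleton l c ih =>
    rw [pvParse_append_bit]
    simp [List.length_append, pow_succ]
    split <;> omega

theorem pvBits_parse (l : List Char) (hb : pvIsBin l) : pvBits l.length (pvParse l) = l := by
  induction l using List.reverseRecOn with
  | nil => simp [pvParse, pvBits]
  | append_singleton l c ih =>
    have hbl : pvIsBin l := fun x hx => hb x (List.mem_append.2 (Or.inl hx))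
    have hbc : c = '0' ∨ c = '1' := hb c (by simp)
    rw [pvParse_append_bit]
    simp only [List.length_append, List.length_singleton, pvBits]
    have hdiv : (2 * pvParse l + (if c = '1' then 1 else 0)) / 2 = pvParse l := by
      split <;> omega
    have hmod : (2 * pvParse l + (if c = '1' then 1 else 0)) % 2 = (if c = '1' then 1 else 0) := by
      split <;> omega
    rw [hdiv, hmod, ih hbl]
    rcases hbc with h | h <;> subst h <;> simp

theorem pvParse_flip_add (l : List Char) (hb : pvIsBin l) :
    pvParse (l.map pvFlip) + pvParse l + 1 = 2 ^ l.length := by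
  induction l using List.reverseRecOn with
  | nil => simp [pvParse]
  | append_singleton l c ih =>
    have hbl : pvIsBin l := fun x hx => hb x (List.mem_append.2 (Or.inl hx))
    have hbc : c = '0' ∨ c = '1' := hb c (by simp)
    have := ih hbl
    rw [List.map_append, List.map_singleton, pvParse_append_bit, pvParse_append_bit]
    simp only [List.length_append, List.length_singleton, pow_succ]
    rcases hbc with h | h <;> subst h <;> simp [pvFlip] <;> omega

theorem pvParse_replicate_zero (k : Nat) (l : List Char) :
    pvParse (List.replicate k '0' ++ l) = pvParse l := by
  induction k with
  | zero => simp
  | succ k ih => simpa [List.replicate_succ, pvParse] using ih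

theorem pvFlip_isBin (l : List Char) : pvIsBin (l.map pvFlip) := by
  intro c hc
  simp [List.mem_map] at hc
  obtain ⟨x, _, hx⟩ := hc
  subst hx; unfold pvFlip; split <;> simp

theorem pvInsFold (k : Nat) (cs : List Char) :
    (PySem.List.pyRange 0 (k : Int) 1).foldl (fun l i => PySem.List.insert l i '0') cs
      = List.replicate k '0' ++ cs := by
  induction k with
  | zero => simp [PySem.List.pyRange_one_eq_nil]
  | succ k ih =>
    rw [Nat.cast_add, Nat.cast_one,
      PySem.List.pyRange_one_succ_right (by positivity), List.foldl_append]
    rw [ih]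
    simp only [List.foldl_cons, List.foldl_nil]
    rw [PySem.List.insert_natCast _ k '0' (by simp)]
    rw [List.take_append_of_le_length (by simp), List.drop_append_of_le_length (by simp)]
    simp [List.replicate_succ']

theorem pvFlipLoop (l : List Char) (d k : Nat) (m acc : List Char)
    (hd : l.length - k = d) (hlen : m.length = l.length)
    (hag : ∀ j, k ≤ j → m[j]? = l[j]?) :
    ((PySem.List.pyRange (k : Int) ((l.length : Int)) 1).foldl
      (fun (st : List Char × List Char) i =>
        if PySem.List.pyGetD st.1 i ' ' = '0' then (st.1.set i.toNat '1', st.2 ++ ['1'])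
        else (st.1.set i.toNat '0', st.2 ++ ['0']))
      (m, acc)).2 = acc ++ (l.drop k).map pvFlip := by
  induction d generalizing k m acc with
  | zero =>
    have hk : l.length ≤ k := by omega
    rw [PySem.List.pyRange_one_eq_nil (by exact_mod_cast hk)]
    simp [List.drop_eq_nil_of_le hk]
  | succ d ih =>
    have hk : k < l.length := by omega
    rw [PySem.List.pyRange_one_cons (by exact_mod_cast hk)]
    simp only [List.foldl_cons]
    have h1 : m[k]? = some l[k] := by rw [hag k le_rfl]; exact List.getElem?_eq_getElem hk
    have hget : PySem.List.pyGetD m (k : Int) ' ' = l[k] := by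
      rw [PySem.List.pyGetD_natCast]
      simp [List.getD, h1]
    have hdrop : l.drop k = l[k] :: l.drop (k + 1) := List.drop_eq_getElem_cons hk
    have hstep : ∀ (c : Char),
        ((PySem.List.pyRange ((k : Int) + 1) ((l.length : Int)) 1).foldl
          (fun (st : List Char × List Char) i =>
            if PySem.List.pyGetD st.1 i ' ' = '0' then (st.1.set i.toNat '1', st.2 ++ ['1'])
            else (st.1.set i.toNat '0', st.2 ++ ['0']))
          (m.set k c, acc ++ [pvFlip l[k]])).2
          = acc ++ (l.drop k).map pvFlip := by
      intro c
      rw [show ((k : Int) + 1) = ((k + 1 : Nat) : Int) by push_cast; ring]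
      rw [ih (k + 1) (m.set k c) (acc ++ [pvFlip l[k]]) (by omega) (by simp [hlen])
        (fun j hj => by
          rw [List.getElem?_set_ne (by omega)]
          exact hag j (by omega))]
      rw [hdrop, List.map_cons, List.append_assoc, List.singleton_append]
    rw [hget]
    by_cases h0 : l[k] = '0'
    · simp only [h0, if_pos]
      have := hstep '1'
      rw [show pvFlip l[k] = '1' by simp [pvFlip, h0]] at this
      simpa [Int.toNat_natCast] using this
    · rw [if_neg h0]
      have := hstep '0'
      rw [show pvFlip l[k] = '0' by simp [pvFlip, h0]] at this
      simpa [Int.toNat_natCast] using this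

-- ===== VERDICT (by name: the statement is the Claim_ definition above) =====
theorem pvPadded_isBin (k : Nat) (cs : List Char) (h : pvIsBin cs) :
    pvIsBin (List.replicate k '0' ++ cs) := by
  intro c hc
  rcases List.mem_append.1 hc with hm | hm
  · exact Or.inl (List.eq_of_mem_replicate hm)
  · exact h c hm

theorem data_reverse_spec : Claim_equal_data_reverse := by
  intro data bit _
  unfold Spec_data_reverse data_reverse data_reverse_alt
  dsimp only
  have hbin : pvIsBin (pvBinCore data.natAbs) := pvBinCore_isBin _
  have hpos : 1 ≤ (pvBinCore data.natAbs).length := pvBinCore_len_pos _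
  set cs := pvBinCore data.natAbs with hcs
  set w : Nat := (max bit ((cs.length : Int))).toNat with hw
  have hnw : cs.length ≤ w := by
    have := le_max_right bit ((cs.length : Int)); omega
  -- the padding phase produces replicate (w - len) '0' ++ cs in both branches
  have hpad : (if ((cs.length : Int)) < bit then
      (PySem.List.pyRange 0 (bit - ((cs.length : Int))) 1).foldl
        (fun l i => PySem.List.insert l i '0') cs
    else cs) = List.replicate (w - cs.length) '0' ++ cs := by
    split
    · rename_i h
      have hwb : w = bit.toNat := by
        have := le_max_left bit ((cs.length : Int))
        have := le_max_right bit ((cs.length : Int))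
        omega
      have hb : bit - ((cs.length : Int)) = (((w - cs.length : Nat)) : Int) := by
        omega
      rw [hb, pvInsFold]
    · rename_i h
      have hwl : w = cs.length := by
        have h1 : max bit ((cs.length : Int)) = ((cs.length : Int)) := max_eq_right (by omega)
        omega
      rw [hwl]; simp
  rw [hpad]
  set padded := List.replicate (w - cs.length) '0' ++ cs with hpadded
  have hlenp : padded.length = w := by simp [hpadded]; omega
  -- A's flip loop is map pvFlip
  have hA := pvFlipLoop padded padded.length 0 padded [] (by omega) rfl (fun j _ => rfl)
  simp only [Nat.cast_zero, List.drop_zero, List.nil_append] at hA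
  rw [hA]
  -- B's value is pvParse cs
  have hval : cs.foldl (fun acc c => 2 * acc + (if c = '1' then 1 else 0)) (0 : Nat)
      = pvParse cs := rfl
  rw [hval]
  set v := pvParse cs with hv
  have hvlt : v < 2 ^ w :=
    lt_of_lt_of_le (pvParse_lt cs) (Nat.pow_le_pow_right (by norm_num) hnw)
  set inv := 2 ^ w - 1 - v with hinv
  have hinvlt : inv < 2 ^ w := by
    have : 1 ≤ 2 ^ w := Nat.one_le_two_pow
    omega
  -- the flipped padded string parses to inv
  have hpb : pvIsBin padded := pvPadded_isBin _ _ hbin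
  have hfb : pvIsBin (padded.map pvFlip) := pvFlip_isBin _
  have hflen : (padded.map pvFlip).length = w := by simp [hlenp]
  have hsum := pvParse_flip_add padded hpb
  rw [hlenp, pvParse_replicate_zero, ← hv] at hsum
  have hflip : pvParse (padded.map pvFlip) = inv := by omega
  -- both sides are pvBits w inv
  have hkey : pvBits w inv = padded.map pvFlip := by
    rw [← hflip, ← hflen]; exact pvBits_parse _ hfb
  obtain ⟨w', hw'⟩ : ∃ w', w = w' + 1 := ⟨w - 1, by omega⟩
  have hfin : List.replicate (w - (pvBinCore inv).length) '0' ++ pvBinCore inv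
      = pvBits w inv := by
    rw [hw']; exact pvPadBin w' inv (by rw [← hw']; exact hinvlt)
  rw [hfin, hkey]
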